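-- pv_equiv track=rewrite | github.com/dsa934/CT_examples | BaekJoon/ST_008.py | condition_3
-- ===== SOURCE A (Python) =====
-- def condition_3(string, vowel):
--
--     v_cnt, nv_cnt = 0, 0
--
--     for idx in range(len(string)):
--
--         if string[idx] in vowel:
--
--             v_cnt +=1
--             nv_cnt =0
--
--         else:
--             nv_cnt +=1
--             v_cnt = 0
--
--         if v_cnt == 3 or nv_cnt == 3 :
--             return False
--
--
--     return True
-- ===== SOURCE B (Python) =====
-- def condition_3(string, vowel):
--     types = [c in vowel for c in string]
--     return not any(a == b == c for a, b, c in zip(types, types[1:], types[2:]))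
-- ===== Notes on version B (the rewrite author's own statement) =====
-- stated objective: idiomatic
-- what changed: Replaces the two resetting run counters and early return with a precomputed vowel/consonant type list and a sliding window-of-3 check (any over zip of the list with its two shifts).
import Mathlib
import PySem

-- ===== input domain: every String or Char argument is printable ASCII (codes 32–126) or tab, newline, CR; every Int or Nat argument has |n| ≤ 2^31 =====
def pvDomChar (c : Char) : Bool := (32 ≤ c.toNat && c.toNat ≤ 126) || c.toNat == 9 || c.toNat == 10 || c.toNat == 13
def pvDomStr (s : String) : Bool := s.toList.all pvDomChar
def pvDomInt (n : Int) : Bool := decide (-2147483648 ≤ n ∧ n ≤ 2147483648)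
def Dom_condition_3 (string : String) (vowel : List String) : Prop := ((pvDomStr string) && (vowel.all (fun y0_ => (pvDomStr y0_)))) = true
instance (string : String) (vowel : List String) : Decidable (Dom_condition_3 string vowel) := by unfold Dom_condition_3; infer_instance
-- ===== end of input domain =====

-- B replaces A's two resetting run counters by a type list plus a window-of-3 scan (idiomatic decomposition; return value identical).

-- ===== PORT A =====
-- the loop over range(len(string)) with the two counters and early 'return False',
-- as structural recursion over the remaining characters with the same (v_cnt, nv_cnt) state
def condition_3_go (vowel : List String) : List Char → Int → Int → Bool
  | [], _, _ => true
  | c :: rest, v_cnt, nv_cnt =>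
    let st := if vowel.contains (String.ofList [c]) then (v_cnt + 1, (0 : Int)) else ((0 : Int), nv_cnt + 1)
    if st.1 = 3 ∨ st.2 = 3 then false else condition_3_go vowel rest st.1 st.2

def condition_3 (string : String) (vowel : List String) : Bool :=
  condition_3_go vowel string.toList 0 0

-- ===== PORT B =====
-- types = [c in vowel for c in string]; not any(a == b == c for a,b,c in zip(types, types[1:], types[2:]))
-- (types[1:] / types[2:] on a list are exactly List.drop 1 / List.drop 2)
def condition_3_alt (string : String) (vowel : List String) : Bool :=
  let types := string.toList.map (fun c => vowel.contains (String.ofList [c]))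
  ! ((types.zip ((types.drop 1).zip (types.drop 2))).any
      (fun x => x.1 == x.2.1 && x.2.1 == x.2.2))

-- ===== PRECONDITION & SPEC =====
def Spec_condition_3 (string : String) (vowel : List String) (out : Bool) : Prop := out = condition_3_alt string vowel
instance (string : String) (vowel : List String) (out : Bool) : Decidable (Spec_condition_3 string vowel out) := by unfold Spec_condition_3; infer_instance

-- ===== CLAIM (what is proved, stated in full; the proofs are below) =====
def Claim_equal_condition_3 : Prop := ∀ (string : String) (vowel : List String), Dom_condition_3 string vowel → Spec_condition_3 string vowel (condition_3 string vowel)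

-- ===== LEMMAS AND PROOFS =====

-- A's counter loop transferred to the list of bools (vowel? of each char)
def goB : List Bool → Int → Int → Bool
  | [], _, _ => true
  | t :: rest, v_cnt, nv_cnt =>
    let st := if t then (v_cnt + 1, (0 : Int)) else ((0 : Int), nv_cnt + 1)
    if st.1 = 3 ∨ st.2 = 3 then false else goB rest st.1 st.2

theorem go_eq_goB (vowel : List String) (l : List Char) (v nv : Int) :
    condition_3_go vowel l v nv = goB (l.map (fun c => vowel.contains (String.ofList [c]))) v nv := by
  induction l generalizing v nv with
  | nil => rfl
  | cons c rest ih =>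
    simp only [condition_3_go, goB, List.map]
    by_cases h : vowel.contains (String.ofList [c]) <;> simp [ih]

-- structural "three consecutive equal" test
def hasTriple : List Bool → Bool
  | a :: b :: c :: r => (a == b && b == c) || hasTriple (b :: c :: r)
  | _ => false

theorem zip_any_eq_hasTriple : ∀ (ts : List Bool),
    ((ts.zip ((ts.drop 1).zip (ts.drop 2))).any
      (fun x => x.1 == x.2.1 && x.2.1 == x.2.2)) = hasTriple ts
  | [] => rfl
  | [_] => rfl
  | [_, _] => rfl
  | a :: b :: c :: r => by
    simp only [List.drop, List.zip_cons_cons, List.any_cons, hasTriple]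
    rw [← zip_any_eq_hasTriple (b :: c :: r)]
    rfl

theorem hasTriple_cons_ne (a b : Bool) (r : List Bool) (h : (a == b) = false) :
    hasTriple (a :: b :: r) = hasTriple (b :: r) := by
  cases r with
  | nil => rfl
  | cons c r' => simp [hasTriple, h]

theorem hasTriple_triple (a : Bool) (r : List Bool) :
    hasTriple (a :: a :: a :: r) = true := by
  simp [hasTriple]

-- hasTriple of a two-element-prefix list, unfolded one step regardless of the tail's shape
theorem hasTriple_cons_cons (a b : Bool) (r : List Bool) :
    hasTriple (a :: b :: r) = ((match r with | c :: _ => a == b && b == c | [] => false) || hasTriple (b :: r)) := by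
  cases r with
  | nil => simp [hasTriple]
  | cons c r' => rfl

-- key invariant: the counters encode a virtual run of already-seen equal types
theorem goB_eq_hasTriple (ts : List Bool) (v nv : Nat)
    (h : (v, nv) = (0, 0) ∨ (v, nv) = (1, 0) ∨ (v, nv) = (2, 0) ∨ (v, nv) = (0, 1) ∨ (v, nv) = (0, 2)) :
    goB ts (v : Int) (nv : Int) = ! hasTriple (List.replicate v true ++ List.replicate nv false ++ ts) := by
  induction ts generalizing v nv with
  | nil =>
    rcases h with h | h | h | h | h <;>
      (injection h with h1 h2; subst h1; subst h2; rfl)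
  | cons t rest ih =>
    rcases h with h | h | h | h | h <;>
        (injection h with h1 h2; subst h1; subst h2) <;> cases t
    · -- (0,0), false
      norm_num [goB, List.replicate]
      simpa using ih 0 1 (by simp)
    · -- (0,0), true
      norm_num [goB, List.replicate]
      simpa using ih 1 0 (by simp)
    · -- (1,0), false
      norm_num [goB, List.replicate]
      rw [hasTriple_cons_ne true false rest (by decide)]
      simpa using ih 0 1 (by simp)
    · -- (1,0), true
      norm_num [goB, List.replicate]
      simpa using ih 2 0 (by simp)
    · -- (2,0), false
      norm_num [goB, List.replicate]
      rw [hasTriple_cons_cons true true (false :: rest),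
        hasTriple_cons_ne true false rest (by decide)]
      simpa using ih 0 1 (by simp)
    · -- (2,0), true
      norm_num [goB, List.replicate, hasTriple_triple]
    · -- (0,1), false
      norm_num [goB, List.replicate]
      simpa using ih 0 2 (by simp)
    · -- (0,1), true
      norm_num [goB, List.replicate]
      rw [hasTriple_cons_ne false true rest (by decide)]
      simpa using ih 1 0 (by simp)
    · -- (0,2), false
      norm_num [goB, List.replicate, hasTriple_triple]
    · -- (0,2), true
      norm_num [goB, List.replicate]
      rw [hasTriple_cons_cons false false (true :: rest),
        hasTriple_cons_ne false true rest (by decide)]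
      simpa using ih 1 0 (by simp)

-- ===== VERDICT (by name: the statement is the Claim_ definition above) =====
theorem condition_3_spec : Claim_equal_condition_3 := by
  intro string vowel _
  unfold Spec_condition_3 condition_3 condition_3_alt
  rw [go_eq_goB]
  simp only [zip_any_eq_hasTriple]
  simpa using goB_eq_hasTriple (string.toList.map (fun c => vowel.contains (String.ofList [c]))) 0 0 (by simp)
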